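-- pv_equiv track=rewrite | github.com/ThePlayWorldStudio/learn | sem4/aois/lab1/src/ieee.py | packParts
-- ===== SOURCE A (Python) =====
-- def packParts(sign, exponent, mantissa):
--     # Отрезаем скрытую единицу
--     fractionValue = mantissa & ((1 << 23) - 1)
--
--     # Формируем экспоненту (8 бит)
--     expBits = []
--     for i in range(7, -1, -1):
--         expBits.append((exponent >> i) & 1)
--
--     # Формируем мантиссу (23 бита)
--     fracBits = []
--     for i in range(22, -1, -1):
--         fracBits.append((fractionValue >> i) & 1)
--
--     return [sign] + expBits + fracBits
-- ===== SOURCE B (Python) =====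
-- def packParts(sign, exponent, mantissa):
--     # Format the low 8 exponent bits and the 23 mantissa bits as binary
--     # strings, then read the digits off the characters.
--     eb = format(exponent & 0xFF, '08b')
--     fb = format(mantissa & ((1 << 23) - 1), '023b')
--     return [sign] + [int(c) for c in eb + fb]
-- ===== Notes on version B (the rewrite author's own statement) =====
-- stated objective: idiomatic
-- what changed: B replaces the two shift-and-mask accumulation loops by masking once, formatting the masked values as fixed-width binary strings, and mapping int over the characters.
import Mathlib
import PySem

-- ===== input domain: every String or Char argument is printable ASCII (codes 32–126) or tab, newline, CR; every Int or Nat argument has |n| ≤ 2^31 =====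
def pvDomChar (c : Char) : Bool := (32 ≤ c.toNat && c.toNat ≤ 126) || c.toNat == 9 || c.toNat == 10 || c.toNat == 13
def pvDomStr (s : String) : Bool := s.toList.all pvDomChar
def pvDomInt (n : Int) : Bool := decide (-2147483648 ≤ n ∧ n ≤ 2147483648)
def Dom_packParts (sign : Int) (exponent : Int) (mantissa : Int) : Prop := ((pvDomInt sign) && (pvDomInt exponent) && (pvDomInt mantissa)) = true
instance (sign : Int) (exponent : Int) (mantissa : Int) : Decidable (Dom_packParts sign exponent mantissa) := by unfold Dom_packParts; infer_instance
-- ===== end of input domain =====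

-- B packs the same 32 bits by formatting the masked values as fixed-width binary
-- strings and mapping int over the characters, instead of A's shift-and-mask loops
-- (objective: idiomatic; same cost).

-- ===== PORT A =====
def packParts (sign : Int) (exponent : Int) (mantissa : Int) : List Int :=
  let fractionValue := PySem.Int.band mantissa ((1 <<< 23) - 1)
  let expBits := (PySem.List.pyRange 7 (-1) (-1)).foldl
    (fun acc i => acc ++ [PySem.Int.band (exponent >>> i.toNat) 1]) []
  let fracBits := (PySem.List.pyRange 22 (-1) (-1)).foldl
    (fun acc i => acc ++ [PySem.Int.band (fractionValue >>> i.toNat) 1]) []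
  [sign] ++ expBits ++ fracBits

-- ===== PORT B =====
-- port of Python's format(n, '0<w>b'): exact whenever 0 ≤ n < 2^w, which is how Source B calls it
def formatBin (w : Nat) (n : Nat) : List Char :=
  match w with
  | 0 => []
  | w + 1 => formatBin w (n / 2) ++ [if n % 2 = 1 then '1' else '0']

def packParts_alt (sign : Int) (exponent : Int) (mantissa : Int) : List Int :=
  let eb := formatBin 8 (PySem.Int.band exponent 0xFF).toNat
  let fb := formatBin 23 (PySem.Int.band mantissa ((1 <<< 23) - 1)).toNat
  -- int(c) on a binary digit character: its code minus 48
  [sign] ++ (eb ++ fb).map (fun c => (c.toNat : Int) - 48)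

-- ===== PRECONDITION & SPEC =====
def Spec_packParts (sign : Int) (exponent : Int) (mantissa : Int) (out : List Int) : Prop := out = packParts_alt sign exponent mantissa
instance (sign : Int) (exponent : Int) (mantissa : Int) (out : List Int) : Decidable (Spec_packParts sign exponent mantissa out) := by unfold Spec_packParts; infer_instance

-- ===== CLAIM (what is proved, stated in full; the proofs are below) =====
def Claim_equal_packParts : Prop := ∀ (sign : Int) (exponent : Int) (mantissa : Int), Dom_packParts sign exponent mantissa → Spec_packParts sign exponent mantissa (packParts sign exponent mantissa)

-- ===== LEMMAS AND PROOFS =====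

-- a % P plus (-a-1) % P always fills P - 1 (two's-complement reflection)
theorem mod_add_negsucc (a P : Int) (hP : 0 < P) : a % P + (-a - 1) % P = P - 1 := by
  have hr0 : 0 ≤ a % P := Int.emod_nonneg a (by omega)
  have hr1 : a % P < P := Int.emod_lt_of_pos a hP
  have h1 : (-a - 1) % P = (-(a % P) - 1) % P := by
    have e : -a - 1 = (-(a % P) - 1) - P * (a / P) := by
      have := Int.emod_def a P; omega
    rw [e, Int.sub_mul_emod_self_left]
  have h2 : (-(a % P) - 1) % P = P - 1 - a % P := by
    have e : -(a % P) - 1 = (P - 1 - a % P) + P * (-1) := by ring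
    rw [e, Int.add_mul_emod_self_left]
    exact Int.emod_eq_of_lt (by omega) (by omega)
  omega

-- Python's a & (2^k - 1) is a mod 2^k, also for negative a (infinite two's complement)
theorem band_mask (x : Int) (k : Nat) :
    PySem.Int.band x (2 ^ k - 1) = x % (2 ^ k : Int) := by
  have hm : ((2:Int) ^ k - 1) = ((2 ^ k - 1 : Nat) : Int) := by
    push_cast [Nat.one_le_two_pow]; ring
  have h3 : (1:Nat) ≤ 2 ^ k := Nat.one_le_two_pow
  have hc : ((2 ^ k : Nat) : Int) = 2 ^ k := by push_cast; rfl
  have hP : (0:Int) < 2 ^ k := by positivity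
  unfold PySem.Int.band
  split
  · rename_i hx
    rw [if_pos (by omega), hm]
    simp only [Int.toNat_natCast, Nat.and_two_pow_sub_one_eq_mod]
    rw [Int.natCast_mod, hc, Int.toNat_of_nonneg hx]
  · rename_i hx
    rw [if_pos (by omega), hm]
    simp only [Int.toNat_natCast, Nat.and_comm, Nat.and_two_pow_sub_one_eq_mod]
    have hy : ((-x - 1).toNat : Int) = -x - 1 := Int.toNat_of_nonneg (by omega)
    have hyl : (-x - 1).toNat % 2 ^ k < 2 ^ k := Nat.mod_lt _ (by positivity)
    have hcast : (((-x - 1).toNat % 2 ^ k : Nat) : Int) = (-x - 1) % 2 ^ k := by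
      rw [Int.natCast_mod, hc, hy]
    have key := mod_add_negsucc x (2 ^ k) hP
    omega

-- bit i of A's shift-and-mask loop, read from x mod 2^k (i < k)
theorem bit_eq (x : Int) (i k : Nat) (hik : i < k) :
    PySem.Int.band (x >>> i) 1 = ((((x % ((2:Int) ^ k)).toNat) >>> i) &&& 1 : Nat) := by
  have hP : (0:Int) < 2 ^ k := by positivity
  rw [PySem.Int.band_one, PySem.Int.mod_eq_emod_of_pos (by norm_num),
      Int.shiftRight_eq_div_pow, Nat.shiftRight_eq_div_pow, Nat.and_one_is_mod]
  set r : Int := x % (2:Int) ^ k with hrdef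
  have hr0 : 0 ≤ r := Int.emod_nonneg x (by omega)
  have e1 : x = r + (x / 2 ^ k * 2 ^ (k - i)) * 2 ^ i := by
    have h2 : (2:Int) ^ (k - i) * 2 ^ i = 2 ^ k := by
      rw [← pow_add]; congr 1; omega
    have h6 := Int.emod_def x (2 ^ k)
    rw [hrdef, mul_assoc, h2, h6]; ring
  have e2 : x / ((2:Int) ^ i) = r / 2 ^ i + x / 2 ^ k * 2 ^ (k - i) := by
    conv_lhs => rw [e1]
    rw [Int.add_mul_ediv_right _ _ (by positivity)]
  have e3 : (r / (2:Int) ^ i + x / 2 ^ k * 2 ^ (k - i)) % 2 = r / 2 ^ i % 2 := by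
    have h4 : x / 2 ^ k * 2 ^ (k - i) = 2 * (x / 2 ^ k * 2 ^ (k - i - 1)) := by
      rw [mul_comm 2, mul_assoc]; congr 1
      rw [← pow_succ]; congr 1; omega
    rw [h4, Int.add_mul_emod_self_left]
  have e4 : ((r.toNat / 2 ^ i % 2 : Nat) : Int) = r / 2 ^ i % 2 := by
    push_cast
    rw [Int.toNat_of_nonneg hr0]
  rw [show (((2 ^ i : Nat)) : Int) = (2:Int) ^ i from by push_cast; rfl, e2, e3, ← e4]

-- B's formatted digits, characterized positionally
theorem formatBin_map (w n : Nat) :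
    (formatBin w n).map (fun c => (c.toNat : Int) - 48)
      = (List.range w).map (fun j => (((n >>> (w - 1 - j)) &&& 1 : Nat) : Int)) := by
  induction w generalizing n with
  | zero => simp [formatBin]
  | succ w ih =>
    rw [formatBin, List.map_append, ih, List.range_succ, List.map_append]
    congr 1
    · apply List.map_congr_left
      intro j hj
      rw [List.mem_range] at hj
      have h1 : (n / 2) >>> (w - 1 - j) = n >>> (w + 1 - 1 - j) := by
        have h2 : w + 1 - 1 - j = (w - 1 - j) + 1 := by omega
        rw [h2, Nat.shiftRight_succ_inside]
      rw [h1]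
    · simp only [List.map_cons, List.map_nil]
      have h5 : n >>> (w + 1 - 1 - w) = n := by simp
      rw [h5, Nat.and_one_is_mod]
      rcases Nat.mod_two_eq_zero_or_one n with h | h <;> simp [h]

-- A's append-accumulate loop is a map
theorem foldl_app (f : Int → Int) (L : List Int) (acc : List Int) :
    L.foldl (fun a i => a ++ [f i]) acc = acc ++ L.map f := by
  induction L generalizing acc with
  | nil => simp
  | cons x xs ih => simp [List.foldl_cons, ih]

-- ===== VERDICT (by name: the statement is the Claim_ definition above) =====
theorem packParts_spec : Claim_equal_packParts := by
  intro s e m _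
  show _ = packParts_alt s e m
  simp only [packParts, packParts_alt]
  rw [show PySem.List.pyRange 7 (-1) (-1) = [7,6,5,4,3,2,1,0] from by decide,
      show PySem.List.pyRange 22 (-1) (-1) =
        [22,21,20,19,18,17,16,15,14,13,12,11,10,9,8,7,6,5,4,3,2,1,0] from by decide,
      show (((1 <<< 23 : Nat) : Int) - 1) = 2 ^ 23 - 1 from by decide,
      show (0xFF : Int) = 2 ^ 8 - 1 from by norm_num,
      band_mask e 8, band_mask m 23,
      foldl_app (fun i => PySem.Int.band (e >>> ((i.toNat : Nat) : Int)) 1),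
      foldl_app (fun i => PySem.Int.band ((m % 2 ^ 23) >>> ((i.toNat : Nat) : Int)) 1),
      show ([22,21,20,19,18,17,16,15,14,13,12,11,10,9,8,7,6,5,4,3,2,1,0] : List Int)
        = (List.range 23).map (fun j => ((22 - j : Nat) : Int)) from by decide,
      show ([7,6,5,4,3,2,1,0] : List Int)
        = (List.range 8).map (fun j => ((7 - j : Nat) : Int)) from by decide,
      List.map_map, List.map_map, List.map_append, formatBin_map, formatBin_map]
  have hA8 : (List.range 8).map
        ((fun i => PySem.Int.band (e >>> ((i.toNat : Nat) : Int)) 1) ∘ (fun j => ((7 - j : Nat) : Int)))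
      = (List.range 8).map (fun j => ((((e % 2 ^ 8).toNat >>> (8 - 1 - j)) &&& 1 : Nat) : Int)) := by
    apply List.map_congr_left
    intro j hj
    rw [List.mem_range] at hj
    show PySem.Int.band (e >>> ((((((7 - j : Nat) : Int)).toNat : Nat)) : Int)) 1 = _
    rw [show (((7 - j : Nat) : Int)).toNat = 7 - j from by simp,
        Int.shiftRight_natCast_right,
        bit_eq e (7 - j) 8 (by omega),
        show 8 - 1 - j = 7 - j from by omega]
  have hA23 : (List.range 23).map
        ((fun i => PySem.Int.band ((m % 2 ^ 23) >>> ((i.toNat : Nat) : Int)) 1) ∘ (fun j => ((22 - j : Nat) : Int)))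
      = (List.range 23).map (fun j => ((((m % 2 ^ 23 % 2 ^ 23).toNat >>> (23 - 1 - j)) &&& 1 : Nat) : Int)) := by
    apply List.map_congr_left
    intro j hj
    rw [List.mem_range] at hj
    show PySem.Int.band ((m % 2 ^ 23) >>> ((((((22 - j : Nat) : Int)).toNat : Nat)) : Int)) 1 = _
    rw [show (((22 - j : Nat) : Int)).toNat = 22 - j from by simp,
        Int.shiftRight_natCast_right,
        bit_eq (m % 2 ^ 23) (22 - j) 23 (by omega),
        show 23 - 1 - j = 22 - j from by omega]
  rw [hA8, hA23, Int.emod_emod_of_dvd _ (by norm_num)]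
  simp
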